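-- pv_equiv track=rewrite | github.com/yubinbai/pcuva-problems | UVa 1209 - Wordfish/main.py | solve
-- ===== SOURCE A (Python) =====
-- INF = 1 << 31
--
-- def lexicographically_next_permutation(a):
--     """
--     Generates the lexicographically next permutation.
--
--     Input: a permutation, called "a". This method modifies
--     "a" in place. Returns True if we could generate a next
--     permutation. Returns False if it was the last permutation
--     lexicographically.
--     """
--     i = len(a) - 2
--     while not (i < 0 or a[i] < a[i + 1]):
--         i -= 1
--     if i < 0:
--         return False
--     j = len(a) - 1
--     while not (a[j] > a[i]):
--         j -= 1
--     a[i], a[j] = a[j], a[i]        # swap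
--     a[i + 1:] = reversed(a[i + 1:])
--     # reverse elements from position i+1 till the end of the sequence
--     return True
--
-- def f(s):
--     m = INF
--     for i in range(1, len(s)):
--         m = min(m, abs(ord(s[i - 1]) - ord(s[i])))
--     return m
--
-- def solve(par):
--     line = par
--     word = list(line)
--     negativeWord = [-1 * ord(e) for e in word]
--     candidates = []
--     for i in range(10):
--         lexicographically_next_permutation(negativeWord)
--         prev = [chr(-1 * e) for e in negativeWord]
--         candidates.append(''.join(prev))
--     candidates.reverse()
--     candidates.append(line)
--     for i in range(10):
--         lexicographically_next_permutation(word)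
--         candidates.append(''.join(word))
--
--     m, mStr = -1, ''
--     for c in candidates:
--         if f(c) > m:
--             mStr = c
--             m = f(c)
--     return mStr + str(m)
-- ===== SOURCE B (Python) =====
-- INF = 1 << 31
--
--
-- def _succ(a):
--     """Smallest permutation of list a strictly greater than a, or None at the maximum."""
--     best = None                     # running max of a[i + 1:]
--     for i in range(len(a) - 2, -1, -1):
--         if best is None or best < a[i + 1]:
--             best = a[i + 1]
--         if a[i] < best:             # some later letter is bigger: i is the pivot
--             tail = a[i + 1:]
--             bigger = [x for x in tail if x > a[i]]
--             c = min(bigger)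
--             tail.remove(c)
--             return a[:i] + [c] + sorted(tail + [a[i]])
--     return None
--
--
-- def _pred(a):
--     """Largest permutation of list a strictly smaller than a, or None at the minimum."""
--     worst = None                    # running min of a[i + 1:]
--     for i in range(len(a) - 2, -1, -1):
--         if worst is None or a[i + 1] < worst:
--             worst = a[i + 1]
--         if worst < a[i]:            # some later letter is smaller: i is the pivot
--             tail = a[i + 1:]
--             smaller = [x for x in tail if x < a[i]]
--             c = max(smaller)
--             tail.remove(c)
--             return a[:i] + [c] + sorted(tail + [a[i]], reverse=True)
--     return None
--
--
-- def _f(s):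
--     return min((abs(ord(x) - ord(y)) for x, y in zip(s, s[1:])), default=INF)
--
--
-- def _walk(step, chars):
--     out = []
--     for _ in range(10):
--         nxt = step(chars)
--         if nxt is not None:
--             chars = nxt
--         out.append(chars)
--     return out
--
--
-- def solve(par):
--     w = list(par)
--     cands = _walk(_pred, w)[::-1] + [w] + _walk(_succ, w)
--     best = max(cands, key=_f)
--     return ''.join(best) + str(_f(best))
-- ===== Notes on version B (the rewrite author's own statement) =====
-- stated objective: alternative
-- what changed: B drops A's in-place permutation stepping (negated-ord encoding for predecessors, adjacent-pair pivot test, swap plus suffix reversal) for pure successor/predecessor functions that find the pivot with a running max/min of the scanned suffix and rebuild the changed suffix with a filter, min/max and a library sort, then pick the winner with max(key=f) over zip-adjacent distances instead of A's best-so-far scan that evaluates f twice per candidate.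
import Mathlib
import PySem

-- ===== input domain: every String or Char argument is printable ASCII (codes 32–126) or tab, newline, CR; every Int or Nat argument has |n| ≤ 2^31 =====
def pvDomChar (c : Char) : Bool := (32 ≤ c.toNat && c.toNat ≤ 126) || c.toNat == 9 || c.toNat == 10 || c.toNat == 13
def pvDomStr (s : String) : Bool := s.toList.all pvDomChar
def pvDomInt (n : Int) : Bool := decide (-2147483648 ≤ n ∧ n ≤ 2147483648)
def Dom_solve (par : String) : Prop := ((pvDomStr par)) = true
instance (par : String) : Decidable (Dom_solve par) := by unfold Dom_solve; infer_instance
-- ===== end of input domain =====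

-- B replaces A's in-place step (negated-ord trick for predecessors, swap + reverse of the
-- suffix) by pure successor/predecessor functions that find the pivot with a running
-- max/min and rebuild the suffix with filter, min/max and a library sort, picking the
-- winner with max(key=f); measured faster by a constant factor (single f per candidate,
-- no negate/encode/decode passes).

-- ===== PORT A =====
def pvINF : Int := 1 <<< 31

-- while not (i < 0 or a[i] < a[i+1]): i -= 1  — fuel n encodes i = n - 1
def npFindI {α : Type} [LinearOrder α] [Inhabited α] (a : List α) : Nat → Option Nat
  | 0 => none
  | k+1 => if a.getD k default < a.getD (k+1) default then some k else npFindI a k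

-- while not (a[j] > a[i]): j -= 1
def npFindJ {α : Type} [LinearOrder α] [Inhabited α] (a : List α) (x : α) : Nat → Nat
  | 0 => 0
  | j+1 => if x < a.getD (j+1) default then j+1 else npFindJ a x j

-- lexicographically_next_permutation, returning the updated list (Python mutates in place)
def nextPermA {α : Type} [LinearOrder α] [Inhabited α] (a : List α) : List α :=
  match npFindI a (a.length - 1) with
  | none => a
  | some i =>
    let j := npFindJ a (a.getD i default) (a.length - 1)
    let b := (a.set i (a.getD j default)).set j (a.getD i default)
    b.take (i+1) ++ (b.drop (i+1)).reverse

-- f(s): m = INF; for i in range(1, len(s)): m = min(m, abs(ord(s[i-1]) - ord(s[i])))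
def fA (s : List Char) : Int :=
  (PySem.List.pyRange 1 (s.length : Int) 1).foldl
    (fun m i => min m |((PySem.List.pyGetD s (i-1) default).toNat : Int) -
                       ((PySem.List.pyGetD s i default).toNat : Int)|) pvINF

-- for i in range(10): next_permutation(negativeWord); candidates.append(chr-decoded word)
def loopNegA : Nat → List Int × List (List Char) → List Int × List (List Char)
  | 0, st => st
  | n+1, st =>
      let nw := nextPermA st.1
      let prev := nw.map (fun e => Char.ofNat (-1 * e).toNat)
      loopNegA n (nw, st.2 ++ [prev])

-- for i in range(10): next_permutation(word); candidates.append(''.join(word))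
def loopWordA : Nat → List Char × List (List Char) → List Char × List (List Char)
  | 0, st => st
  | n+1, st =>
      let w := nextPermA st.1
      loopWordA n (w, st.2 ++ [w])

def solve (par : String) : String :=
  let line := par.toList
  let word := line
  let negativeWord := word.map (fun e => -1 * ((e.toNat : Int)))
  let st := loopNegA 10 (negativeWord, [])
  let candidates := st.2.reverse ++ [line]
  let st2 := loopWordA 10 (word, candidates)
  let res := st2.2.foldl (fun p c => if fA c > p.1 then (fA c, c) else p)
               ((-1 : Int), ([] : List Char))
  String.ofList (res.2 ++ PySem.Int.toChars res.1)

-- ===== PORT B =====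
-- _f(s) = min((abs(ord(x) - ord(y)) for x, y in zip(s, s[1:])), default=INF)
def fB (s : List Char) : Int :=
  PySem.List.minD ((s.zip s.tail).map
    (fun p => |((p.1.toNat : Int)) - ((p.2.toNat : Int))|)) id pvINF

-- _succ: 'for i in range(len(a) - 2, -1, -1)' — fuel k+1 examines index k,
-- carrying best = running max of a[i + 1:] (None before the first update)
def succGo (a : List Char) : Option Char → Nat → Option (List Char)
  | _, 0 => none
  | best, k+1 =>
      -- if best is None or best < a[i + 1]: best = a[i + 1]
      let best' := match best with
        | none => a.getD (k+1) default
        | some b => if b < a.getD (k+1) default then a.getD (k+1) default else b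
      if a.getD k default < best' then
        let tail := a.drop (k+1)
        let bigger := tail.filter (fun y => decide (a.getD k default < y))
        -- bigger is nonempty here, so min(bigger) and tail.remove(c) are safe
        let c := (PySem.List.min? bigger (fun y => y)).getD default
        let rest := (PySem.List.remove? tail c).getD tail
        some (a.take k ++ [c] ++ PySem.List.sorted (rest ++ [a.getD k default]) (fun y => y))
      else succGo a (some best') k

-- _pred, symmetric: worst = running min, max of the smaller letters, sort descending
def predGo (a : List Char) : Option Char → Nat → Option (List Char)
  | _, 0 => none
  | worst, k+1 =>
      let worst' := match worst with
        | none => a.getD (k+1) default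
        | some b => if a.getD (k+1) default < b then a.getD (k+1) default else b
      if worst' < a.getD k default then
        let tail := a.drop (k+1)
        let smaller := tail.filter (fun y => decide (y < a.getD k default))
        let c := (PySem.List.max? smaller (fun y => y)).getD default
        let rest := (PySem.List.remove? tail c).getD tail
        some (a.take k ++ [c] ++ PySem.List.sorted (rest ++ [a.getD k default]) (fun y => y) true)
      else predGo a (some worst') k

-- _walk(step, chars): ten snapshots, keeping chars when step returns None
def walkB (step : List Char → Option (List Char)) : Nat → List Char → List (List Char)
  | 0, _ => []
  | n+1, chars =>
      let chars' := match step chars with | some t => t | none => chars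
      chars' :: walkB step n chars'

def solve_alt (par : String) : String :=
  let w := par.toList
  -- _walk(_pred, w)[::-1] — xs[::-1] is List.reverse (PySem.List.slice?_none_none_neg_one)
  let cands := (walkB (fun a => predGo a none (a.length - 1)) 10 w).reverse ++ [w]
                 ++ walkB (fun a => succGo a none (a.length - 1)) 10 w
  let best := PySem.List.maxD cands fB []
  String.ofList (best ++ PySem.Int.toChars (fB best))

-- ===== PRECONDITION & SPEC =====
def Spec_solve (par : String) (out : String) : Prop := out = solve_alt par
instance (par : String) (out : String) : Decidable (Spec_solve par out) := by unfold Spec_solve; infer_instance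

-- ===== CLAIM (what is proved, stated in full; the proofs are below) =====
def Claim_equal_solve : Prop := ∀ (par : String), Dom_solve par → Spec_solve par (solve par)

-- ===== LEMMAS AND PROOFS =====

-- proof-side helpers: A's step as a pure comparator-parametrised function, and the
-- ten-snapshot orbit of an arbitrary step function
def bFindI {α : Type} [Inhabited α] (gt : α → α → Bool) (a : List α) : Nat → Option Nat
  | 0 => none
  | k+1 => if gt (a.getD (k+1) default) (a.getD k default) then some k else bFindI gt a k

def bFindJ {α : Type} [Inhabited α] (gt : α → α → Bool) (a : List α) (x : α) : Nat → Nat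
  | 0 => 0
  | j+1 => if gt (a.getD (j+1) default) x then j+1 else bFindJ gt a x j

def stepB {α : Type} [Inhabited α] (gt : α → α → Bool) (a : List α) : List α :=
  match bFindI gt a (a.length - 1) with
  | none => a
  | some i =>
    let j := bFindJ gt a (a.getD i default) (a.length - 1)
    let b := (a.set i (a.getD j default)).set j (a.getD i default)
    b.take (i+1) ++ (b.drop (i+1)).reverse

def runG (g : List Char → List Char) : Nat → List Char → List (List Char)
  | 0, _ => []
  | n+1, s => let s' := g s; s' :: runG g n s'

theorem char_lt_iff (a b : Char) : a < b ↔ a.toNat < b.toNat := by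
  rw [Char.lt_def, UInt32.lt_iff_toNat_lt, Char.toNat_val, Char.toNat_val]

theorem char_toNat_lt (c : Char) : c.toNat < 1114112 := by
  have h := c.valid
  rw [UInt32.isValidChar] at h
  have h2 : c.toNat = c.val.toNat := rfl
  rcases h with h | ⟨_, h⟩ <;> omega

theorem getD_map_neg (a : List Char) (k : Nat) (h : k < a.length) :
    (a.map (fun e => -1 * ((e.toNat : Int)))).getD k default
      = -1 * (((a.getD k default).toNat : Int)) := by
  simp [List.getD_eq_getElem?_getD, List.getElem?_map, List.getElem?_eq_getElem h]

theorem bFindI_lt {α : Type} [Inhabited α] {gt : α → α → Bool} {a : List α} :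
    ∀ {n i : Nat}, bFindI gt a n = some i → i < n
  | 0, i, h => by simp [bFindI] at h
  | k+1, i, h => by
    rw [bFindI] at h
    split at h
    · cases h; omega
    · exact Nat.lt_succ_of_lt (bFindI_lt h)

theorem bFindJ_le {α : Type} [Inhabited α] (gt : α → α → Bool) (a : List α) (x : α) :
    ∀ n, bFindJ gt a x n ≤ n
  | 0 => le_refl 0
  | j+1 => by
    rw [bFindJ]
    split
    · exact le_refl _
    · exact Nat.le_succ_of_le (bFindJ_le gt a x j)

theorem npFindI_map (a : List Char) :
    ∀ n, n < a.length →
      npFindI (a.map (fun e => -1 * ((e.toNat : Int)))) n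
        = bFindI (fun x y => decide (x < y)) a n
  | 0, _ => rfl
  | k+1, h => by
    rw [npFindI, bFindI]
    rw [getD_map_neg a k (by omega), getD_map_neg a (k+1) h]
    have hc : (-1 * (((a.getD k default).toNat : Int)) < -1 * (((a.getD (k+1) default).toNat : Int)))
        ↔ (a.getD (k+1) default < a.getD k default) := by
      rw [char_lt_iff]; omega
    simp only [hc, decide_eq_true_eq]
    split
    · rfl
    · exact npFindI_map a k (by omega)

theorem npFindJ_map (a : List Char) (x : Char) :
    ∀ n, n < a.length →
      npFindJ (a.map (fun e => -1 * ((e.toNat : Int)))) (-1 * ((x.toNat : Int))) n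
        = bFindJ (fun x y => decide (x < y)) a x n
  | 0, _ => rfl
  | j+1, h => by
    rw [npFindJ, bFindJ]
    rw [getD_map_neg a (j+1) h]
    have hc : (-1 * ((x.toNat : Int)) < -1 * (((a.getD (j+1) default).toNat : Int)))
        ↔ (a.getD (j+1) default < x) := by
      rw [char_lt_iff]; omega
    simp only [hc, decide_eq_true_eq]
    split
    · rfl
    · exact npFindJ_map a x j (by omega)

theorem nextPermA_map_neg (a : List Char) :
    nextPermA (a.map (fun e => -1 * ((e.toNat : Int))))
      = (stepB (fun x y => decide (x < y)) a).map (fun e => -1 * ((e.toNat : Int))) := by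
  by_cases ha : a = []
  · subst ha; rfl
  · have hlen : 0 < a.length := List.length_pos_of_ne_nil ha
    unfold nextPermA stepB
    rw [List.length_map]
    rw [npFindI_map a (a.length - 1) (by omega)]
    cases hfi : bFindI (fun x y => decide (x < y)) a (a.length - 1) with
    | none => rfl
    | some i =>
      have hi : i < a.length := lt_of_lt_of_le (bFindI_lt hfi) (by omega)
      simp only
      rw [getD_map_neg a i hi]
      rw [npFindJ_map a (a.getD i default) (a.length - 1) (by omega)]
      have hjlen : bFindJ (fun x y => decide (x < y)) a (a.getD i default) (a.length - 1) < a.length :=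
        lt_of_le_of_lt (bFindJ_le _ _ _ _) (by omega)
      rw [getD_map_neg a _ hjlen]
      rw [← List.map_set, ← List.map_set]
      rw [← List.map_take, ← List.map_drop, ← List.map_reverse, ← List.map_append]

theorem npFindI_gt (a : List Char) :
    ∀ n, npFindI a n = bFindI (fun x y => decide (y < x)) a n
  | 0 => rfl
  | k+1 => by
    rw [npFindI, bFindI]
    simp only [decide_eq_true_eq]
    split
    · rfl
    · exact npFindI_gt a k

theorem npFindJ_gt (a : List Char) (x : Char) :
    ∀ n, npFindJ a x n = bFindJ (fun x y => decide (y < x)) a x n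
  | 0 => rfl
  | j+1 => by
    rw [npFindJ, bFindJ]
    simp only [decide_eq_true_eq]
    split
    · rfl
    · exact npFindJ_gt a x j

theorem nextPermA_eq_stepB (a : List Char) :
    nextPermA a = stepB (fun x y => decide (y < x)) a := by
  unfold nextPermA stepB
  rw [npFindI_gt a (a.length - 1)]
  cases hfi : bFindI (fun x y => decide (y < x)) a (a.length - 1) with
  | none => rfl
  | some i => simp only [npFindJ_gt]

theorem map_unneg_map_neg (l : List Char) :
    (l.map (fun e => -1 * ((e.toNat : Int)))).map (fun e => Char.ofNat (-1 * e).toNat) = l := by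
  rw [List.map_map]
  apply List.map_id''
  intro c
  simp only [Function.comp]
  have h1 : (-1 * (-1 * ((c.toNat : Int)))) = ((c.toNat : Int)) := by ring
  rw [h1, Int.toNat_natCast, Char.ofNat_toNat]

theorem loopWordA_eq :
    ∀ (n : Nat) (a : List Char) (acc : List (List Char)),
      loopWordA n (a, acc)
        = ((stepB (fun x y => decide (y < x)))^[n] a,
            acc ++ runG (stepB (fun x y => decide (y < x))) n a)
  | 0, a, acc => by simp [loopWordA, runG]
  | n+1, a, acc => by
    rw [loopWordA]
    simp only [nextPermA_eq_stepB]
    rw [loopWordA_eq n]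
    rw [runG, Function.iterate_succ_apply]
    simp

theorem loopNegA_eq :
    ∀ (n : Nat) (a : List Char) (acc : List (List Char)),
      loopNegA n (a.map (fun e => -1 * ((e.toNat : Int))), acc)
        = (((stepB (fun x y => decide (x < y)))^[n] a).map (fun e => -1 * ((e.toNat : Int))),
            acc ++ runG (stepB (fun x y => decide (x < y))) n a)
  | 0, a, acc => by simp [loopNegA, runG]
  | n+1, a, acc => by
    rw [loopNegA]
    simp only [nextPermA_map_neg, map_unneg_map_neg]
    rw [loopNegA_eq n]
    rw [runG, Function.iterate_succ_apply]
    simp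

-- ---- the orbit of B's Option-valued steps is the orbit of A's total steps ----

theorem walkB_eq (step : List Char → Option (List Char)) (g : List Char → List Char)
    (h : ∀ s, (match step s with | some t => t | none => s) = g s) :
    ∀ (n : Nat) (s : List Char), walkB step n s = runG g n s
  | 0, s => rfl
  | n+1, s => by
    rw [walkB, runG]
    simp only [h]
    rw [walkB_eq step g h n]

-- ---- generic order facts used by the succ/pred bridges ----

theorem le_bound_of_pairwise_ge (hd x : Char) (t : List Char)
    (hP : List.Pairwise (fun p q => q ≤ p) (hd :: t)) (hhd : hd ≤ x) :
    ∀ v ∈ hd :: t, v ≤ x := by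
  intro v hv
  rcases List.mem_cons.mp hv with h | h
  · subst h; exact hhd
  · exact le_trans (List.rel_of_pairwise_cons hP h) hhd

theorem ge_bound_of_pairwise_le (hd x : Char) (t : List Char)
    (hP : List.Pairwise (fun p q => p ≤ q) (hd :: t)) (hhd : x ≤ hd) :
    ∀ v ∈ hd :: t, x ≤ v := by
  intro v hv
  rcases List.mem_cons.mp hv with h | h
  · subst h; exact hhd
  · exact le_trans hhd (List.rel_of_pairwise_cons hP h)

theorem bFindJ_spec (gt : Char → Char → Bool) (a : List Char) (x : Char) (J : Nat)
    (hJ1 : 1 ≤ J) (hJx : gt (a.getD J default) x = true) :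
    ∀ m, J ≤ m → (∀ idx, J < idx → idx ≤ m → gt (a.getD idx default) x = false) →
      bFindJ gt a x m = J := by
  intro m
  induction m with
  | zero => intro hJm _; omega
  | succ m ih =>
    intro hJm hidx
    rw [bFindJ]
    by_cases hJeq : J = m + 1
    · subst hJeq; rw [hJx]; simp
    · rw [hidx (m+1) (by omega) (le_refl _)]
      simp only [Bool.false_eq_true, if_false]
      exact ih (by omega) (fun idx h2 h3 => hidx idx h2 (by omega))

theorem getD_mid (A M : List Char) (x : Char) (n : Nat) :
    (A ++ x :: M).getD (A.length + 1 + n) default = M.getD n default := by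
  rw [List.getD_append_right _ _ _ _ (by omega)]
  have h : A.length + 1 + n - A.length = n + 1 := by omega
  rw [h, List.getD_cons_succ]

theorem sorted_rev_eq_of_perm_of_pairwise_ge (xs ys : List Char) (h : ys.Perm xs)
    (hp : List.Pairwise (fun p q => q ≤ p) ys) :
    PySem.List.sorted xs (fun y => y) true = ys := by
  apply List.Perm.eq_of_pairwise (le := fun p q => q ≤ p)
  · intro a b _ _ h1 h2; exact le_antisymm h2 h1
  · exact PySem.List.sorted_pairwise_rev xs (fun y => y)
  · exact hp
  · exact (PySem.List.sorted_perm xs _ true).trans h.symm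

-- ===== the successor bridge: B's _succ is A's next-permutation step =====

-- the rebuilt suffix B sorts is exactly A's reversed suffix
theorem succ_sorted (U' V rest : List Char) (x c : Char)
    (hrest : (U' ++ c :: V).Perm (c :: rest))
    (hU'c : ∀ u ∈ U', c ≤ u) (hPU' : List.Pairwise (fun p q => q ≤ p) U')
    (hV : ∀ v ∈ V, v ≤ x) (hPV : List.Pairwise (fun p q => q ≤ p) V)
    (hxc : x < c) :
    PySem.List.sorted (rest ++ [x]) (fun y => y) = (U' ++ x :: V).reverse := by
  apply PySem.List.sorted_id_eq_of_perm_of_pairwise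
  · have h2 : (U' ++ V).Perm rest :=
      ((List.perm_middle.symm).trans hrest).cons_inv
    exact ((List.reverse_perm _).trans List.perm_middle).trans
      ((h2.cons x).trans (List.perm_append_singleton x rest).symm)
  · rw [List.pairwise_reverse]
    show List.Pairwise (fun p q => q ≤ p) (U' ++ x :: V)
    rw [List.pairwise_append]
    refine ⟨hPU', List.Pairwise.cons (fun v hv => hV v hv) hPV, ?_⟩
    intro u hu b hb
    rcases List.mem_cons.mp hb with h | h
    · subst h; exact le_trans (le_of_lt hxc) (hU'c u hu)
    · exact le_trans (le_trans (hV b h) (le_of_lt hxc)) (hU'c u hu)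

-- A's swap-and-reverse payload on the decomposition a = A ++ x :: U' ++ c :: V
theorem succ_fire (a A U' V : List Char) (x c : Char) (k : Nat)
    (hdec : a = A ++ x :: (U' ++ c :: V)) (hA : A.length = k)
    (hV : ∀ v ∈ V, v ≤ x) (hxc : x < c) :
    ((a.set k (a.getD (bFindJ (fun p q => decide (q < p)) a x (a.length - 1)) default)).set
        (bFindJ (fun p q => decide (q < p)) a x (a.length - 1)) x).take (k + 1)
      ++ (((a.set k (a.getD (bFindJ (fun p q => decide (q < p)) a x (a.length - 1)) default)).set
        (bFindJ (fun p q => decide (q < p)) a x (a.length - 1)) x).drop (k + 1)).reverse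
      = A ++ [c] ++ (U' ++ x :: V).reverse := by
  subst hdec
  subst hA
  have hlen : (A ++ x :: (U' ++ c :: V)).length = A.length + 1 + U'.length + 1 + V.length := by
    simp; omega
  have hgJ : (A ++ x :: (U' ++ c :: V)).getD (A.length + 1 + U'.length) default = c := by
    rw [getD_mid]
    rw [List.getD_append_right _ _ _ _ (le_refl _), Nat.sub_self, List.getD_cons_zero]
  have hJ : bFindJ (fun p q => decide (q < p)) (A ++ x :: (U' ++ c :: V)) x
      ((A ++ x :: (U' ++ c :: V)).length - 1) = A.length + 1 + U'.length := by
    apply bFindJ_spec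
    · omega
    · rw [hgJ]; simpa using hxc
    · omega
    · intro idx h1 h2
      rw [hlen] at h2
      have hd : idx - (A.length + 1 + U'.length + 1) < V.length := by omega
      have heq : idx = A.length + 1 + (U'.length + 1 + (idx - (A.length + 1 + U'.length + 1))) := by
        omega
      rw [heq, getD_mid]
      rw [List.getD_append_right _ _ _ _ (by omega)]
      have h3 : U'.length + 1 + (idx - (A.length + 1 + U'.length + 1)) - U'.length
          = (idx - (A.length + 1 + U'.length + 1)) + 1 := by omega
      rw [h3, List.getD_cons_succ]
      have hmem : (V.getD (idx - (A.length + 1 + U'.length + 1)) default) ∈ V := by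
        rw [List.getD_eq_getElem V default hd]; exact List.getElem_mem _
      exact decide_eq_false (not_lt.mpr (hV _ hmem))
  rw [hJ, hgJ]
  have hset : ((A ++ x :: (U' ++ c :: V)).set A.length c).set (A.length + 1 + U'.length) x
      = A ++ c :: (U' ++ x :: V) := by
    rw [List.set_append, if_neg (lt_irrefl _), Nat.sub_self, List.set_cons_zero]
    rw [List.set_append, if_neg (by omega)]
    have h4 : A.length + 1 + U'.length - A.length = U'.length + 1 := by omega
    rw [h4, List.set_cons_succ]
    rw [List.set_append, if_neg (lt_irrefl _), Nat.sub_self, List.set_cons_zero]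
  rw [hset]
  rw [List.take_append, List.take_of_length_le (by omega),
      List.drop_append, List.drop_eq_nil_of_le (by omega), List.nil_append]
  have h5 : A.length + 1 - A.length = 1 := by omega
  rw [h5]
  simp

theorem dropWhile_head_false (p : Char → Bool) (l : List Char) (w : Char) (ws : List Char)
    (h : l.dropWhile p = w :: ws) : p w = false := by
  have h0 := List.head_dropWhile_not p (l := l) (w := by rw [h]; simp)
  rwa [show (List.dropWhile p l).head _ = w from by simp [h]] at h0

theorem succGo_eq (a : List Char) :
    ∀ n, ∀ best : Option Char, n + 1 ≤ a.length →
      List.Pairwise (fun p q => q ≤ p) (a.drop n) →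
      (∀ b, best = some b → b ∈ a.drop (n+1) ∧ ∀ v ∈ a.drop (n+1), v ≤ b) →
      (best = none → a.drop (n+1) = []) →
      (match succGo a best n with | some t => t | none => a)
        = match bFindI (fun p q => decide (q < p)) a n with
          | none => a
          | some i =>
            let j := bFindJ (fun p q => decide (q < p)) a (a.getD i default) (a.length - 1)
            let b := (a.set i (a.getD j default)).set j (a.getD i default)
            b.take (i+1) ++ (b.drop (i+1)).reverse := by
  intro n
  induction n with
  | zero => intro best _ _ _ _; rfl
  | succ k ih =>
    intro best hlen hP hsome hnone
    have hk : k < a.length := by omega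
    have hk1 : k + 1 < a.length := by omega
    have hxg : a.getD k default = a[k] := List.getD_eq_getElem a default hk
    have hg1 : a.getD (k+1) default = a[k+1] := List.getD_eq_getElem a default hk1
    have ht : a.drop (k+1) = a[k+1] :: a.drop (k+2) := by
      rw [← List.getElem_cons_drop hk1]
    have hg1mem : a.getD (k+1) default ∈ a.drop (k+1) := by
      rw [ht, hg1]; exact List.mem_cons_self
    -- the running maximum after its update at index k
    obtain ⟨B', hB'⟩ : ∃ B', (match best with
        | none => a.getD (k+1) default
        | some b => if b < a.getD (k+1) default then a.getD (k+1) default else b) = B' :=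
      ⟨_, rfl⟩
    have key : B' ∈ a.drop (k+1) ∧ a.getD (k+1) default ≤ B' ∧
        (∀ b, best = some b → b ≤ B') := by
      cases best with
      | none =>
        rw [show (match (none : Option Char) with
            | none => a.getD (k+1) default
            | some b => if b < a.getD (k+1) default then a.getD (k+1) default else b)
          = a.getD (k+1) default from rfl] at hB'
        rw [← hB']
        exact ⟨hg1mem, le_refl _, fun b hb => by cases hb⟩
      | some b =>
        rw [show (match (some b : Option Char) with
            | none => a.getD (k+1) default
            | some b => if b < a.getD (k+1) default then a.getD (k+1) default else b)
          = if b < a.getD (k+1) default then a.getD (k+1) default else b from rfl] at hB'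
        by_cases hcmp : b < a.getD (k+1) default
        · rw [if_pos hcmp] at hB'
          rw [← hB']
          exact ⟨hg1mem, le_refl _,
            fun b' hb' => by cases Option.some.inj hb'; exact le_of_lt hcmp⟩
        · rw [if_neg hcmp] at hB'
          rw [← hB']
          refine ⟨?_, not_lt.mp hcmp,
            fun b' hb' => by cases Option.some.inj hb'; exact le_refl _⟩
          rw [ht]
          exact List.mem_cons_of_mem _ (hsome b rfl).1
    obtain ⟨hB'mem, hk1B, hbB'⟩ := key
    have hB'bnd : ∀ v ∈ a.drop (k+1), v ≤ B' := by
      intro v hv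
      rw [ht] at hv
      rcases List.mem_cons.mp hv with h | h
      · subst h; rw [← hg1]; exact hk1B
      · cases best with
        | none =>
          have h0 := hnone rfl
          rw [h0] at h; cases h
        | some b => exact le_trans ((hsome b rfl).2 v h) (hbB' b rfl)
    have hcond_iff : (a.getD k default < B') ↔ (a.getD k default < a.getD (k+1) default) := by
      constructor
      · intro h
        have hPc := hP
        rw [ht] at hPc
        have hub : B' ≤ a[k+1] :=
          le_bound_of_pairwise_ge a[k+1] a[k+1] (a.drop (k+2)) hPc (le_refl _) B'
            (by rw [← ht]; exact hB'mem)
        rw [hg1]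
        exact lt_of_lt_of_le h hub
      · intro h
        exact lt_of_lt_of_le h hk1B
    by_cases hc : a.getD k default < a.getD (k+1) default
    · -- pivot found at index k on both sides
      have hU_ne : (a.drop (k+1)).takeWhile (fun y => decide (a.getD k default < y)) ≠ [] := by
        rw [ht, List.takeWhile_cons_of_pos (by rw [← hg1]; simpa using hc)]
        simp
      obtain ⟨U, hUdef⟩ : ∃ U, (a.drop (k+1)).takeWhile (fun y => decide (a.getD k default < y)) = U :=
        ⟨_, rfl⟩
      obtain ⟨V, hVdef⟩ : ∃ V, (a.drop (k+1)).dropWhile (fun y => decide (a.getD k default < y)) = V :=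
        ⟨_, rfl⟩
      rw [hUdef] at hU_ne
      obtain ⟨c, hcdef⟩ : ∃ c, U.getLast hU_ne = c := ⟨_, rfl⟩
      obtain ⟨U', hU'def⟩ : ∃ u, U.dropLast = u := ⟨_, rfl⟩
      have hUsplit : U = U' ++ [c] := by rw [← hcdef, ← hU'def, List.dropLast_append_getLast]
      have hts : a.drop (k+1) = U ++ V := by
        rw [← hUdef, ← hVdef, List.takeWhile_append_dropWhile]
      have hteq : a.drop (k+1) = U' ++ c :: V := by rw [hts, hUsplit]; simp
      have hPU : List.Pairwise (fun p q => q ≤ p) U :=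
        List.Pairwise.sublist (hUdef ▸ List.takeWhile_sublist _) hP
      have hPV : List.Pairwise (fun p q => q ≤ p) V :=
        List.Pairwise.sublist (hVdef ▸ List.dropWhile_sublist _) hP
      have hPU' : List.Pairwise (fun p q => q ≤ p) U' :=
        List.Pairwise.sublist (hU'def ▸ List.dropLast_sublist U) hPU
      have hU'c : ∀ u ∈ U', c ≤ u := by
        intro u hu
        exact (List.pairwise_append.mp (hUsplit ▸ hPU)).2.2 u hu c (by simp)
      have hUx : ∀ u ∈ U, a.getD k default < u := by
        intro u hu
        rw [← hUdef] at hu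
        have h2 := List.mem_takeWhile_imp (p := fun y => decide (a.getD k default < y)) hu
        simpa using h2
      have hxc : a.getD k default < c := hUx c (hcdef ▸ List.getLast_mem hU_ne)
      have hVx : ∀ v ∈ V, v ≤ a.getD k default := by
        cases hVcase : V with
        | nil => intro v hv; cases hv
        | cons w ws =>
          intro v hv
          have hpw := dropWhile_head_false (fun y => decide (a.getD k default < y))
            (a.drop (k+1)) w ws (hVdef.trans hVcase)
          have hw : w ≤ a.getD k default := by simpa using hpw
          exact le_bound_of_pairwise_ge w (a.getD k default) ws (hVcase ▸ hPV) hw v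
            (hVcase ▸ hv)
      have hct : c ∈ a.drop (k+1) := by
        rw [hteq]; exact List.mem_append_right _ List.mem_cons_self
      have hfilter : (a.drop (k+1)).filter (fun y => decide (a.getD k default < y)) = U' ++ [c] := by
        rw [hts, List.filter_append]
        have hfU : U.filter (fun y => decide (a.getD k default < y)) = U := by
          apply List.filter_eq_self.mpr
          intro u hu
          rw [← hUdef] at hu
          have h2 := List.mem_takeWhile_imp (p := fun y => decide (a.getD k default < y)) hu
          exact h2
        have hfV : V.filter (fun y => decide (a.getD k default < y)) = [] :=
          List.filter_eq_nil_iff.mpr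
            (fun v hv => by simp only [decide_eq_true_eq, not_lt]; exact hVx v hv)
        rw [hfU, hfV, List.append_nil, hUsplit]
      have hdropk : a.drop k = a.getD k default :: (U' ++ c :: V) := by
        rw [← hteq, hxg, List.getElem_cons_drop]
      have hdec : a = a.take k ++ a.getD k default :: (U' ++ c :: V) := by
        conv_lhs => rw [← List.take_append_drop k a, hdropk]
      have hcondT : (decide (a.getD k default < a.getD (k+1) default) : Bool) = true := by
        simpa using hc
      rw [bFindI]
      simp only [hcondT, if_true]
      simp only [succGo]
      rw [hB', if_pos (hcond_iff.mpr hc)]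
      rw [hfilter]
      have hmin : (PySem.List.min? (U' ++ [c]) (fun y => y)).getD default = c := by
        cases hm : PySem.List.min? (U' ++ [c]) (fun y => y) with
        | none => rw [PySem.List.min?_eq_none_iff] at hm; simp at hm
        | some m =>
          have hmem : m ∈ U' ++ [c] := PySem.List.min?_mem hm
          have hmle : m ≤ c := PySem.List.min?_isMin hm c (by simp)
          have hcm : c ≤ m := by
            rcases List.mem_append.mp hmem with h | h
            · exact hU'c m h
            · simp at h; exact le_of_eq h.symm
          rw [le_antisymm hmle hcm]; rfl
      rw [hmin]
      rw [PySem.List.remove?_eq_some_erase _ c hct, Option.getD_some]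
      rw [succ_sorted U' V ((a.drop (k+1)).erase c) (a.getD k default) c
        (hteq ▸ List.perm_cons_erase hct) hU'c hPU' hVx hPV hxc]
      exact (succ_fire a (a.take k) U' V (a.getD k default) c k hdec
        (List.length_take_of_le (by omega)) hVx hxc).symm
    · -- no pivot at k: both sides step to k
      have hhd : a[k+1] ≤ a.getD k default := by rw [← hg1]; exact not_lt.mp hc
      have hallle : ∀ v ∈ a.drop (k+1), v ≤ a.getD k default := by
        rw [ht] at hP ⊢
        exact le_bound_of_pairwise_ge a[k+1] (a.getD k default) (a.drop (k+2)) hP hhd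
      have hPk : List.Pairwise (fun p q => q ≤ p) (a.drop k) := by
        have : a.drop k = a.getD k default :: a.drop (k+1) := by
          rw [hxg, List.getElem_cons_drop hk]
        rw [this]
        exact List.Pairwise.cons (fun v hv => hallle v hv) hP
      have hcondF : (decide (a.getD k default < a.getD (k+1) default) : Bool) = false := by
        simpa using hc
      rw [bFindI]
      simp only [hcondF, Bool.false_eq_true, if_false]
      simp only [succGo]
      rw [hB', if_neg (fun h => hc (hcond_iff.mp h))]
      exact ih (some B') (by omega) hPk
        (fun b hb => by
          have hbe : B' = b := Option.some.inj hb
          subst hbe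
          exact ⟨hB'mem, hB'bnd⟩)
        (fun h => by cases h)

theorem pairwise_drop_last (a : List Char) (r : Char → Char → Prop) :
    List.Pairwise r (a.drop (a.length - 1)) := by
  have h1 : (a.drop (a.length - 1)).length ≤ 1 := by rw [List.length_drop]; omega
  cases hl : a.drop (a.length - 1) with
  | nil => exact List.Pairwise.nil
  | cons hd tl =>
    rw [hl] at h1
    have : tl = [] := by
      cases tl with
      | nil => rfl
      | cons y ys => simp at h1
    subst this
    exact List.pairwise_singleton r hd

theorem stepSucc_total (a : List Char) :
    (match succGo a none (a.length - 1) with | some t => t | none => a)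
      = stepB (fun p q => decide (q < p)) a := by
  by_cases ha : a = []
  · subst ha; rfl
  · have h1 : 1 ≤ a.length := List.length_pos_of_ne_nil ha
    rw [stepB]
    exact succGo_eq a (a.length - 1) none (by omega) (pairwise_drop_last a _)
      (fun b hb => by cases hb)
      (fun _ => by
        have h2 : a.length - 1 + 1 = a.length := by omega
        rw [h2, List.drop_length])

-- ===== the predecessor bridge: B's _pred is A's negated-ords step (all orders flipped) =====

theorem pred_sorted (U' V rest : List Char) (x c : Char)
    (hrest : (U' ++ c :: V).Perm (c :: rest))
    (hU'c : ∀ u ∈ U', u ≤ c) (hPU' : List.Pairwise (fun p q => p ≤ q) U')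
    (hV : ∀ v ∈ V, x ≤ v) (hPV : List.Pairwise (fun p q => p ≤ q) V)
    (hcx : c < x) :
    PySem.List.sorted (rest ++ [x]) (fun y => y) true = (U' ++ x :: V).reverse := by
  apply sorted_rev_eq_of_perm_of_pairwise_ge
  · have h2 : (U' ++ V).Perm rest :=
      ((List.perm_middle.symm).trans hrest).cons_inv
    exact ((List.reverse_perm _).trans List.perm_middle).trans
      ((h2.cons x).trans (List.perm_append_singleton x rest).symm)
  · rw [List.pairwise_reverse]
    show List.Pairwise (fun p q => p ≤ q) (U' ++ x :: V)
    rw [List.pairwise_append]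
    refine ⟨hPU', List.Pairwise.cons (fun v hv => hV v hv) hPV, ?_⟩
    intro u hu b hb
    rcases List.mem_cons.mp hb with h | h
    · subst h; exact le_trans (hU'c u hu) (le_of_lt hcx)
    · exact le_trans (le_trans (hU'c u hu) (le_of_lt hcx)) (hV b h)

theorem pred_fire (a A U' V : List Char) (x c : Char) (k : Nat)
    (hdec : a = A ++ x :: (U' ++ c :: V)) (hA : A.length = k)
    (hV : ∀ v ∈ V, x ≤ v) (hcx : c < x) :
    ((a.set k (a.getD (bFindJ (fun p q => decide (p < q)) a x (a.length - 1)) default)).set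
        (bFindJ (fun p q => decide (p < q)) a x (a.length - 1)) x).take (k + 1)
      ++ (((a.set k (a.getD (bFindJ (fun p q => decide (p < q)) a x (a.length - 1)) default)).set
        (bFindJ (fun p q => decide (p < q)) a x (a.length - 1)) x).drop (k + 1)).reverse
      = A ++ [c] ++ (U' ++ x :: V).reverse := by
  subst hdec
  subst hA
  have hlen : (A ++ x :: (U' ++ c :: V)).length = A.length + 1 + U'.length + 1 + V.length := by
    simp; omega
  have hgJ : (A ++ x :: (U' ++ c :: V)).getD (A.length + 1 + U'.length) default = c := by
    rw [getD_mid]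
    rw [List.getD_append_right _ _ _ _ (le_refl _), Nat.sub_self, List.getD_cons_zero]
  have hJ : bFindJ (fun p q => decide (p < q)) (A ++ x :: (U' ++ c :: V)) x
      ((A ++ x :: (U' ++ c :: V)).length - 1) = A.length + 1 + U'.length := by
    apply bFindJ_spec
    · omega
    · rw [hgJ]; simpa using hcx
    · omega
    · intro idx h1 h2
      rw [hlen] at h2
      have hd : idx - (A.length + 1 + U'.length + 1) < V.length := by omega
      have heq : idx = A.length + 1 + (U'.length + 1 + (idx - (A.length + 1 + U'.length + 1))) := by
        omega
      rw [heq, getD_mid]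
      rw [List.getD_append_right _ _ _ _ (by omega)]
      have h3 : U'.length + 1 + (idx - (A.length + 1 + U'.length + 1)) - U'.length
          = (idx - (A.length + 1 + U'.length + 1)) + 1 := by omega
      rw [h3, List.getD_cons_succ]
      have hmem : (V.getD (idx - (A.length + 1 + U'.length + 1)) default) ∈ V := by
        rw [List.getD_eq_getElem V default hd]; exact List.getElem_mem _
      exact decide_eq_false (not_lt.mpr (hV _ hmem))
  rw [hJ, hgJ]
  have hset : ((A ++ x :: (U' ++ c :: V)).set A.length c).set (A.length + 1 + U'.length) x
      = A ++ c :: (U' ++ x :: V) := by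
    rw [List.set_append, if_neg (lt_irrefl _), Nat.sub_self, List.set_cons_zero]
    rw [List.set_append, if_neg (by omega)]
    have h4 : A.length + 1 + U'.length - A.length = U'.length + 1 := by omega
    rw [h4, List.set_cons_succ]
    rw [List.set_append, if_neg (lt_irrefl _), Nat.sub_self, List.set_cons_zero]
  rw [hset]
  rw [List.take_append, List.take_of_length_le (by omega),
      List.drop_append, List.drop_eq_nil_of_le (by omega), List.nil_append]
  have h5 : A.length + 1 - A.length = 1 := by omega
  rw [h5]
  simp

theorem predGo_eq (a : List Char) :
    ∀ n, ∀ best : Option Char, n + 1 ≤ a.length →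
      List.Pairwise (fun p q => p ≤ q) (a.drop n) →
      (∀ b, best = some b → b ∈ a.drop (n+1) ∧ ∀ v ∈ a.drop (n+1), b ≤ v) →
      (best = none → a.drop (n+1) = []) →
      (match predGo a best n with | some t => t | none => a)
        = match bFindI (fun p q => decide (p < q)) a n with
          | none => a
          | some i =>
            let j := bFindJ (fun p q => decide (p < q)) a (a.getD i default) (a.length - 1)
            let b := (a.set i (a.getD j default)).set j (a.getD i default)
            b.take (i+1) ++ (b.drop (i+1)).reverse := by
  intro n
  induction n with
  | zero => intro best _ _ _ _; rfl
  | succ k ih =>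
    intro best hlen hP hsome hnone
    have hk : k < a.length := by omega
    have hk1 : k + 1 < a.length := by omega
    have hxg : a.getD k default = a[k] := List.getD_eq_getElem a default hk
    have hg1 : a.getD (k+1) default = a[k+1] := List.getD_eq_getElem a default hk1
    have ht : a.drop (k+1) = a[k+1] :: a.drop (k+2) := by
      rw [← List.getElem_cons_drop hk1]
    have hg1mem : a.getD (k+1) default ∈ a.drop (k+1) := by
      rw [ht, hg1]; exact List.mem_cons_self
    -- the running maximum after its update at index k
    obtain ⟨B', hB'⟩ : ∃ B', (match best with
        | none => a.getD (k+1) default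
        | some b => if a.getD (k+1) default < b then a.getD (k+1) default else b) = B' :=
      ⟨_, rfl⟩
    have key : B' ∈ a.drop (k+1) ∧ B' ≤ a.getD (k+1) default ∧
        (∀ b, best = some b → B' ≤ b) := by
      cases best with
      | none =>
        rw [show (match (none : Option Char) with
            | none => a.getD (k+1) default
            | some b => if a.getD (k+1) default < b then a.getD (k+1) default else b)
          = a.getD (k+1) default from rfl] at hB'
        rw [← hB']
        exact ⟨hg1mem, le_refl _, fun b hb => by cases hb⟩
      | some b =>
        rw [show (match (some b : Option Char) with
            | none => a.getD (k+1) default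
            | some b => if a.getD (k+1) default < b then a.getD (k+1) default else b)
          = if a.getD (k+1) default < b then a.getD (k+1) default else b from rfl] at hB'
        by_cases hcmp : a.getD (k+1) default < b
        · rw [if_pos hcmp] at hB'
          rw [← hB']
          exact ⟨hg1mem, le_refl _,
            fun b' hb' => by cases Option.some.inj hb'; exact le_of_lt hcmp⟩
        · rw [if_neg hcmp] at hB'
          rw [← hB']
          refine ⟨?_, not_lt.mp hcmp,
            fun b' hb' => by cases Option.some.inj hb'; exact le_refl _⟩
          rw [ht]
          exact List.mem_cons_of_mem _ (hsome b rfl).1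
    obtain ⟨hB'mem, hk1B, hbB'⟩ := key
    have hB'bnd : ∀ v ∈ a.drop (k+1), B' ≤ v := by
      intro v hv
      rw [ht] at hv
      rcases List.mem_cons.mp hv with h | h
      · subst h; rw [← hg1]; exact hk1B
      · cases best with
        | none =>
          have h0 := hnone rfl
          rw [h0] at h; cases h
        | some b => exact le_trans (hbB' b rfl) ((hsome b rfl).2 v h)
    have hcond_iff : (B' < a.getD k default) ↔ (a.getD (k+1) default < a.getD k default) := by
      constructor
      · intro h
        have hPc := hP
        rw [ht] at hPc
        have hub : a[k+1] ≤ B' :=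
          ge_bound_of_pairwise_le a[k+1] a[k+1] (a.drop (k+2)) hPc (le_refl _) B'
            (by rw [← ht]; exact hB'mem)
        rw [hg1]
        exact lt_of_le_of_lt hub h
      · intro h
        exact lt_of_le_of_lt hk1B h
    by_cases hc : a.getD (k+1) default < a.getD k default
    · -- pivot found at index k on both sides
      have hU_ne : (a.drop (k+1)).takeWhile (fun y => decide (y < a.getD k default)) ≠ [] := by
        rw [ht, List.takeWhile_cons_of_pos (by rw [← hg1]; simpa using hc)]
        simp
      obtain ⟨U, hUdef⟩ : ∃ U, (a.drop (k+1)).takeWhile (fun y => decide (y < a.getD k default)) = U :=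
        ⟨_, rfl⟩
      obtain ⟨V, hVdef⟩ : ∃ V, (a.drop (k+1)).dropWhile (fun y => decide (y < a.getD k default)) = V :=
        ⟨_, rfl⟩
      rw [hUdef] at hU_ne
      obtain ⟨c, hcdef⟩ : ∃ c, U.getLast hU_ne = c := ⟨_, rfl⟩
      obtain ⟨U', hU'def⟩ : ∃ u, U.dropLast = u := ⟨_, rfl⟩
      have hUsplit : U = U' ++ [c] := by rw [← hcdef, ← hU'def, List.dropLast_append_getLast]
      have hts : a.drop (k+1) = U ++ V := by
        rw [← hUdef, ← hVdef, List.takeWhile_append_dropWhile]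
      have hteq : a.drop (k+1) = U' ++ c :: V := by rw [hts, hUsplit]; simp
      have hPU : List.Pairwise (fun p q => p ≤ q) U :=
        List.Pairwise.sublist (hUdef ▸ List.takeWhile_sublist _) hP
      have hPV : List.Pairwise (fun p q => p ≤ q) V :=
        List.Pairwise.sublist (hVdef ▸ List.dropWhile_sublist _) hP
      have hPU' : List.Pairwise (fun p q => p ≤ q) U' :=
        List.Pairwise.sublist (hU'def ▸ List.dropLast_sublist U) hPU
      have hU'c : ∀ u ∈ U', u ≤ c := by
        intro u hu
        exact (List.pairwise_append.mp (hUsplit ▸ hPU)).2.2 u hu c (by simp)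
      have hUx : ∀ u ∈ U, u < a.getD k default := by
        intro u hu
        rw [← hUdef] at hu
        have h2 := List.mem_takeWhile_imp (p := fun y => decide (y < a.getD k default)) hu
        simpa using h2
      have hcx : c < a.getD k default := hUx c (hcdef ▸ List.getLast_mem hU_ne)
      have hVx : ∀ v ∈ V, a.getD k default ≤ v := by
        cases hVcase : V with
        | nil => intro v hv; cases hv
        | cons w ws =>
          intro v hv
          have hpw := dropWhile_head_false (fun y => decide (y < a.getD k default))
            (a.drop (k+1)) w ws (hVdef.trans hVcase)
          have hw : a.getD k default ≤ w := by simpa using hpw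
          exact ge_bound_of_pairwise_le w (a.getD k default) ws (hVcase ▸ hPV) hw v
            (hVcase ▸ hv)
      have hct : c ∈ a.drop (k+1) := by
        rw [hteq]; exact List.mem_append_right _ List.mem_cons_self
      have hfilter : (a.drop (k+1)).filter (fun y => decide (y < a.getD k default)) = U' ++ [c] := by
        rw [hts, List.filter_append]
        have hfU : U.filter (fun y => decide (y < a.getD k default)) = U := by
          apply List.filter_eq_self.mpr
          intro u hu
          rw [← hUdef] at hu
          have h2 := List.mem_takeWhile_imp (p := fun y => decide (y < a.getD k default)) hu
          exact h2
        have hfV : V.filter (fun y => decide (y < a.getD k default)) = [] :=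
          List.filter_eq_nil_iff.mpr
            (fun v hv => by simp only [decide_eq_true_eq, not_lt]; exact hVx v hv)
        rw [hfU, hfV, List.append_nil, hUsplit]
      have hdropk : a.drop k = a.getD k default :: (U' ++ c :: V) := by
        rw [← hteq, hxg, List.getElem_cons_drop]
      have hdec : a = a.take k ++ a.getD k default :: (U' ++ c :: V) := by
        conv_lhs => rw [← List.take_append_drop k a, hdropk]
      have hcondT : (decide (a.getD (k+1) default < a.getD k default) : Bool) = true := by
        simpa using hc
      rw [bFindI]
      simp only [hcondT, if_true]
      simp only [predGo]
      rw [hB', if_pos (hcond_iff.mpr hc)]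
      rw [hfilter]
      have hmax : (PySem.List.max? (U' ++ [c]) (fun y => y)).getD default = c := by
        cases hm : PySem.List.max? (U' ++ [c]) (fun y => y) with
        | none => rw [PySem.List.max?_eq_none_iff] at hm; simp at hm
        | some m =>
          have hmem : m ∈ U' ++ [c] := PySem.List.max?_mem hm
          have hmle : c ≤ m := PySem.List.max?_isMax hm c (by simp)
          have hcm : m ≤ c := by
            rcases List.mem_append.mp hmem with h | h
            · exact hU'c m h
            · simp at h; exact le_of_eq h
          rw [le_antisymm hcm hmle]; rfl
      rw [hmax]
      rw [PySem.List.remove?_eq_some_erase _ c hct, Option.getD_some]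
      rw [pred_sorted U' V ((a.drop (k+1)).erase c) (a.getD k default) c
        (hteq ▸ List.perm_cons_erase hct) hU'c hPU' hVx hPV hcx]
      exact (pred_fire a (a.take k) U' V (a.getD k default) c k hdec
        (List.length_take_of_le (by omega)) hVx hcx).symm
    · -- no pivot at k: both sides step to k
      have hhd : a.getD k default ≤ a[k+1] := by rw [← hg1]; exact not_lt.mp hc
      have hallle : ∀ v ∈ a.drop (k+1), a.getD k default ≤ v := by
        rw [ht] at hP ⊢
        exact ge_bound_of_pairwise_le a[k+1] (a.getD k default) (a.drop (k+2)) hP hhd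
      have hPk : List.Pairwise (fun p q => p ≤ q) (a.drop k) := by
        have : a.drop k = a.getD k default :: a.drop (k+1) := by
          rw [hxg, List.getElem_cons_drop hk]
        rw [this]
        exact List.Pairwise.cons (fun v hv => hallle v hv) hP
      have hcondF : (decide (a.getD (k+1) default < a.getD k default) : Bool) = false := by
        simpa using hc
      rw [bFindI]
      simp only [hcondF, Bool.false_eq_true, if_false]
      simp only [predGo]
      rw [hB', if_neg (fun h => hc (hcond_iff.mp h))]
      exact ih (some B') (by omega) hPk
        (fun b hb => by
          have hbe : B' = b := Option.some.inj hb
          subst hbe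
          exact ⟨hB'mem, hB'bnd⟩)
        (fun h => by cases h)

theorem stepPred_total (a : List Char) :
    (match predGo a none (a.length - 1) with | some t => t | none => a)
      = stepB (fun p q => decide (p < q)) a := by
  by_cases ha : a = []
  · subst ha; rfl
  · have h1 : 1 ≤ a.length := List.length_pos_of_ne_nil ha
    rw [stepB]
    exact predGo_eq a (a.length - 1) none (by omega) (pairwise_drop_last a _)
      (fun b hb => by cases hb)
      (fun _ => by
        have h2 : a.length - 1 + 1 = a.length := by omega
        rw [h2, List.drop_length])

-- ---- the scoring functions agree ----

theorem pyRange_eq_nil {a b : Int} (h : b ≤ a) : PySem.List.pyRange a b = [] := by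
  rw [List.eq_nil_iff_forall_not_mem]
  intro x hx
  have := PySem.List.mem_pyRange_one.mp hx
  omega

theorem pyRange_length : ∀ (n : Nat) (a b : Int), (b - a).toNat = n →
    (PySem.List.pyRange a b).length = n
  | 0, a, b, h => by rw [pyRange_eq_nil (by omega)]; rfl
  | n+1, a, b, h => by
    rw [PySem.List.pyRange_one_cons (by omega)]
    simp [pyRange_length n (a+1) b (by omega)]

theorem pyRange_getElem? : ∀ (n : Nat) (a b : Int), (b - a).toNat = n →
    ∀ (k : Nat), k < n → (PySem.List.pyRange a b)[k]? = some (a + k)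
  | 0, a, b, h => by omega
  | n+1, a, b, h => by
    intro k hk
    rw [PySem.List.pyRange_one_cons (by omega)]
    cases k with
    | zero => simp
    | succ k =>
      simp only [List.getElem?_cons_succ]
      rw [pyRange_getElem? n (a+1) b (by omega) k (by omega)]
      congr 1
      push_cast
      ring

theorem pyRange_getElem (n : Nat) (a b : Int) (h : (b - a).toNat = n)
    (k : Nat) (hk : k < (PySem.List.pyRange a b).length) :
    (PySem.List.pyRange a b)[k] = a + k := by
  have h2 := pyRange_getElem? n a b h k (by rwa [pyRange_length n a b h] at hk)
  rw [List.getElem?_eq_getElem hk] at h2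
  exact Option.some.inj h2

theorem range_map_eq_zip (s : List Char) :
    (PySem.List.pyRange 1 (s.length : Int) 1).map
        (fun i => |((PySem.List.pyGetD s (i-1) default).toNat : Int) -
                   ((PySem.List.pyGetD s i default).toNat : Int)|)
      = (s.zip s.tail).map (fun p => |((p.1.toNat : Int)) - ((p.2.toNat : Int))|) := by
  apply List.ext_getElem
  · rw [List.length_map, List.length_map, List.length_zip, List.length_tail,
        pyRange_length (s.length - 1) 1 (s.length : Int) (by omega)]
    omega
  · intro k h1 h2
    rw [List.length_map, pyRange_length (s.length - 1) 1 (s.length : Int) (by omega)] at h1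
    rw [List.getElem_map, List.getElem_map]
    rw [pyRange_getElem (s.length - 1) 1 (s.length : Int) (by omega) k
        (by rw [pyRange_length (s.length - 1) 1 (s.length : Int) (by omega)]; omega)]
    have e1 : (1 + (k : Int) - 1) = ((k : Nat) : Int) := by ring
    have e2 : (1 + (k : Int)) = (((k+1 : Nat)) : Int) := by push_cast; ring
    rw [e1, e2, PySem.List.pyGetD_natCast, PySem.List.pyGetD_natCast]
    rw [List.getD_eq_getElem s default (by omega), List.getD_eq_getElem s default (by omega)]
    rw [List.getElem_zip]
    simp [List.getElem_tail]

theorem pvINF_eq : pvINF = 2147483648 := by decide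

theorem abs_diff_le_pvINF (c d : Char) :
    |((c.toNat : Int)) - ((d.toNat : Int))| ≤ pvINF := by
  have h1 := char_toNat_lt c
  have h2 := char_toNat_lt d
  rw [pvINF_eq, abs_le]
  constructor <;> omega

theorem fA_eq_fold (s : List Char) :
    fA s = ((s.zip s.tail).map
      (fun p => |((p.1.toNat : Int)) - ((p.2.toNat : Int))|)).foldl min pvINF := by
  rw [fA, ← range_map_eq_zip s, List.foldl_map]

theorem min?_elim (l : List Int) :
    PySem.List.min? l id
      = l.foldl (fun acc x => acc.elim (some x)
          (fun m => if x < m then some x else some m)) none := by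
  rw [PySem.List.min?]
  simp only [id_eq]
  apply List.foldl_ext
  intro a x _
  cases a <;> rfl

theorem foldl_min_fromsome : ∀ (l : List Int) (b : Int),
    List.foldl (fun acc x => acc.elim (some x)
        (fun m => if x < m then some x else some m)) (some b) l
      = some (List.foldl min b l)
  | [], b => rfl
  | x :: t, b => by
    rw [List.foldl_cons, List.foldl_cons]
    show List.foldl _ (if x < b then some x else some b) t = _
    by_cases h : x < b
    · rw [if_pos h, foldl_min_fromsome t x, min_eq_right h.le]
    · rw [if_neg h, foldl_min_fromsome t b, min_eq_left (not_lt.mp h)]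

theorem fB_eq_fold (s : List Char) :
    fB s = ((s.zip s.tail).map
      (fun p => |((p.1.toNat : Int)) - ((p.2.toNat : Int))|)).foldl min pvINF := by
  rw [fB, PySem.List.minD, min?_elim]
  cases hl : (s.zip s.tail).map (fun p => |((p.1.toNat : Int)) - ((p.2.toNat : Int))|) with
  | nil => rfl
  | cons x t =>
    rw [List.foldl_cons]
    have hx : x ≤ pvINF := by
      have hmem : x ∈ (s.zip s.tail).map (fun p => |((p.1.toNat : Int)) - ((p.2.toNat : Int))|) := by
        rw [hl]; exact List.mem_cons_self
      obtain ⟨p, _, hp⟩ := List.mem_map.mp hmem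
      rw [← hp]; exact abs_diff_le_pvINF p.1 p.2
    show (List.foldl _ (some x) t).getD pvINF = _
    rw [foldl_min_fromsome t x, Option.getD_some, List.foldl_cons, min_eq_right hx]

theorem fA_eq_fB : fA = fB := by
  funext s
  rw [fA_eq_fold, fB_eq_fold]

theorem foldl_min_nonneg : ∀ (l : List Int) (b : Int), 0 ≤ b → (∀ x ∈ l, 0 ≤ x) →
    0 ≤ l.foldl min b
  | [], b, hb, _ => hb
  | x :: t, b, hb, hl => by
    rw [List.foldl_cons]
    exact foldl_min_nonneg t (min b x) (le_min hb (hl x List.mem_cons_self))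
      (fun y hy => hl y (List.mem_cons_of_mem x hy))

theorem fB_nonneg (s : List Char) : 0 ≤ fB s := by
  rw [fB_eq_fold]
  apply foldl_min_nonneg
  · rw [pvINF_eq]; norm_num
  · intro x hx
    obtain ⟨p, _, hp⟩ := List.mem_map.mp hx
    rw [← hp]
    exact abs_nonneg _

-- ---- A's best-so-far scan is max(cands, key=f) ----

theorem max?_elim (l : List (List Char)) :
    PySem.List.max? l fB
      = l.foldl (fun acc x => acc.elim (some x)
          (fun m => if fB m < fB x then some x else some m)) none := by
  rw [PySem.List.max?]
  apply List.foldl_ext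
  intro a x _
  cases a <;> rfl

theorem selFold : ∀ (t : List (List Char)) (b : List Char),
    ∃ r, t.foldl (fun acc x => acc.elim (some x)
          (fun m => if fB m < fB x then some x else some m)) (some b) = some r
      ∧ t.foldl (fun p c => if fB c > p.1 then (fB c, c) else p) (fB b, b) = (fB r, r)
  | [], b => ⟨b, rfl, rfl⟩
  | x :: t, b => by
    rw [List.foldl_cons, List.foldl_cons]
    show (∃ r, List.foldl _ (if fB b < fB x then some x else some b) t = some r ∧
      List.foldl _ (if fB x > fB b then (fB x, x) else (fB b, b)) t = (fB r, r))
    by_cases h : fB b < fB x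
    · rw [if_pos h, if_pos (gt_iff_lt.mpr h)]
      exact selFold t x
    · rw [if_neg h, if_neg (fun h2 => h (gt_iff_lt.mp h2))]
      exact selFold t b

theorem selMain (l : List (List Char)) (hl : l ≠ []) :
    l.foldl (fun p c => if fB c > p.1 then (fB c, c) else p) ((-1 : Int), ([] : List Char))
      = (fB (PySem.List.maxD l fB []), PySem.List.maxD l fB []) := by
  cases l with
  | nil => exact absurd rfl hl
  | cons c t =>
    rw [List.foldl_cons]
    show List.foldl _ (if fB c > (-1 : Int) then (fB c, c) else ((-1 : Int), ([] : List Char))) t = _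
    have h0 : fB c > (-1 : Int) := lt_of_lt_of_le (by norm_num) (fB_nonneg c)
    rw [if_pos h0]
    obtain ⟨r, h1, h2⟩ := selFold t c
    rw [h2, PySem.List.maxD, max?_elim, List.foldl_cons]
    show _ = (fB ((List.foldl (fun acc x => acc.elim (some x)
          (fun m => if fB m < fB x then some x else some m)) (some c) t).getD []),
        (List.foldl (fun acc x => acc.elim (some x)
          (fun m => if fB m < fB x then some x else some m)) (some c) t).getD [])
    rw [h1, Option.getD_some]

theorem main_lemma (par : String) : solve par = solve_alt par := by
  unfold solve solve_alt
  simp only [fA_eq_fB, loopNegA_eq, loopWordA_eq, List.nil_append]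
  rw [walkB_eq _ _ stepPred_total, walkB_eq _ _ stepSucc_total]
  rw [selMain _ (by simp)]

-- ===== VERDICT (by name: the statement is the Claim_ definition above) =====
theorem solve_spec : Claim_equal_solve := by
  intro par _
  unfold Spec_solve
  exact main_lemma par
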